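-- pv_equiv track=rewrite | github.com/benquick123/code-profiling | code/batch-1/vse-naloge-brez-testov/DN7-M-55.py | zapisi_pot
-- ===== SOURCE A (Python) =====
-- def zapisi_pot(pot):
--     koda = ""
--     smer = 0  # 0 = gor, 1 = desno, 2 = dol, 3= levo
--     for a,b in zip(pot, pot[1::]):
--         x,y = a
--         razx = a[0] - b[0]
--         razy = a[1] - b[1]
--         if razx < 0:
--             while smer != 1:
--                 koda += "DESNO "
--                 smer+=1
--                 if smer > 3:
--                     smer = 0
--         if razx > 0:
--             while smer != 3:
--                 koda += "DESNO "
--                 smer+=1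
--                 if smer > 3:
--                     smer = 0
--         if razy < 0:
--             while smer != 2:
--                 koda += "DESNO "
--                 smer+=1
--                 if smer > 3:
--                     smer = 0
--         if razy > 0:
--             while smer != 0:
--                 koda += "DESNO "
--                 smer+=1
--                 if smer > 3:
--                     smer = 0
--
--         if razx:
--             koda += str(abs(razx))+" "
--         if razy:
--             koda += str(abs(razy))+" "
--     return koda
--
--
--
--
--
--
--     """
--     Za podano pot vrni seznam ukazov (glej navodila naloge).
--
--     Args:
--         pot (list of tuple of int): pot
--
--     Returns:
--         str: ukazi, napisani po vrsticah
--     """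
-- ===== SOURCE B (Python) =====
-- _D = "DESNO "
-- # constant 4x4 table: _TURN[prev][target] = the right-turn string from heading prev to target
-- _TURN = [["", _D, _D * 2, _D * 3],
--          [_D * 3, "", _D, _D * 2],
--          [_D * 2, _D * 3, "", _D],
--          [_D, _D * 2, _D * 3, ""]]
--
--
-- def zapisi_pot(pot):
--     def go(p, rest, smer):
--         if not rest:
--             return ""
--         q = rest[0]
--         razx = p[0] - q[0]
--         razy = p[1] - q[1]
--         seg = ""
--         if razx:
--             tx = 1 if razx < 0 else 3
--             seg += _TURN[smer][tx]
--             smer = tx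
--         if razy:
--             ty = 2 if razy < 0 else 0
--             seg += _TURN[smer][ty]
--             smer = ty
--         if razx:
--             seg += str(abs(razx)) + " "
--         if razy:
--             seg += str(abs(razy)) + " "
--         return seg + go(q, rest[1:], smer)
--     return go(pot[0], pot[1:], 0) if pot else ""
-- ===== Notes on version B (the rewrite author's own statement) =====
-- stated objective: alternative
-- what changed: Replaces the iterative accumulator with four copy-pasted one-step-at-a-time while-loops by a recursive walk over the path that looks the whole turn string up in a constant 4x4 table indexed by (previous heading, target heading) and builds the result back-to-front by concatenating each segment onto the recursive call.
import Mathlib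
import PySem

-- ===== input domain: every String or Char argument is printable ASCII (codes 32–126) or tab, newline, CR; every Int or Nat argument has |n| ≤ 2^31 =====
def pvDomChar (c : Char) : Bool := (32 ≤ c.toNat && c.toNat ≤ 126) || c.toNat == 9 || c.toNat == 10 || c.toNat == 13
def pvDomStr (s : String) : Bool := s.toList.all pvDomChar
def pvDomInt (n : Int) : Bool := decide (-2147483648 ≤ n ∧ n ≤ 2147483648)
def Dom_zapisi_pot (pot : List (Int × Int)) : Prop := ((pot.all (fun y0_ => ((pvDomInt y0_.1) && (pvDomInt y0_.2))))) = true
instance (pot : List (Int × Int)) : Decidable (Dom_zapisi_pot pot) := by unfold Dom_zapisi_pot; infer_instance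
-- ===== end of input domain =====

-- B replaces A's stateful loop with four one-step-at-a-time while-loops by a recursive walk that
-- looks the whole turn string up in a constant 4x4 table and concatenates segments back-to-front.


-- ===== PORT A =====
-- Strings are modelled on the List Char side (PySem.Chars convention); "DESNO " is this char list.
def pvDESNO : List Char := ['D', 'E', 'S', 'N', 'O', ' ']

-- A's 'while smer != target: koda += "DESNO "; smer += 1; if smer > 3: smer = 0'.
-- Fuel 4 only makes the recursion total; with 0 ≤ smer ≤ 3 the loop body runs < 4 times.
def pvRotWhile : Nat → Int → Int → List Char → Int × List Char
  | 0, _, smer, koda => (smer, koda)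
  | fuel + 1, target, smer, koda =>
    if smer ≠ target then
      let koda := koda ++ pvDESNO
      let smer := smer + 1
      let smer := if smer > 3 then 0 else smer
      pvRotWhile fuel target smer koda
    else (smer, koda)

def pvStepA (st : Int × List Char) (ab : (Int × Int) × (Int × Int)) : Int × List Char :=
  let razx := ab.1.1 - ab.2.1
  let razy := ab.1.2 - ab.2.2
  let st := if razx < 0 then pvRotWhile 4 1 st.1 st.2 else st
  let st := if razx > 0 then pvRotWhile 4 3 st.1 st.2 else st
  let st := if razy < 0 then pvRotWhile 4 2 st.1 st.2 else st
  let st := if razy > 0 then pvRotWhile 4 0 st.1 st.2 else st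
  let koda := if razx ≠ 0 then st.2 ++ PySem.Int.toChars |razx| ++ [' '] else st.2
  let koda := if razy ≠ 0 then koda ++ PySem.Int.toChars |razy| ++ [' '] else koda
  (st.1, koda)

def zapisi_pot (pot : List (Int × Int)) : String :=
  String.ofList ((List.zip pot (pot.drop 1)).foldl pvStepA ((0 : Int), ([] : List Char))).2

-- ===== PORT B =====
-- the constant table _TURN of Source B: _TURN[prev][target]
def pvTurnTable : List (List (List Char)) :=
  [[[], pvDESNO, pvDESNO ++ pvDESNO, pvDESNO ++ pvDESNO ++ pvDESNO],
   [pvDESNO ++ pvDESNO ++ pvDESNO, [], pvDESNO, pvDESNO ++ pvDESNO],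
   [pvDESNO ++ pvDESNO, pvDESNO ++ pvDESNO ++ pvDESNO, [], pvDESNO],
   [pvDESNO, pvDESNO ++ pvDESNO, pvDESNO ++ pvDESNO ++ pvDESNO, []]]

-- Python's _TURN[smer][t]; both indices are always in 0..3 here, so '.getD []' is exact.
def pvLook (smer t : Int) : List Char :=
  ((PySem.List.pyGet? ((PySem.List.pyGet? pvTurnTable smer).getD []) t).getD [])

-- Source B's inner recursive 'go'
def pvGo : (Int × Int) → List (Int × Int) → Int → List Char
  | _, [], _ => []
  | p, q :: rest, smer =>
    let razx := p.1 - q.1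
    let razy := p.2 - q.2
    let st : List Char × Int :=
      if razx ≠ 0 then
        let tx : Int := if razx < 0 then 1 else 3
        (pvLook smer tx, tx)
      else ([], smer)
    let st : List Char × Int :=
      if razy ≠ 0 then
        let ty : Int := if razy < 0 then 2 else 0
        (st.1 ++ pvLook st.2 ty, ty)
      else st
    let seg := if razx ≠ 0 then st.1 ++ PySem.Int.toChars |razx| ++ [' '] else st.1
    let seg := if razy ≠ 0 then seg ++ PySem.Int.toChars |razy| ++ [' '] else seg
    seg ++ pvGo q rest st.2

def zapisi_pot_alt (pot : List (Int × Int)) : String :=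
  match pot with
  | [] => String.ofList []
  | p :: rest => String.ofList (pvGo p rest 0)

-- ===== PRECONDITION & SPEC =====
def Spec_zapisi_pot (pot : List (Int × Int)) (out : String) : Prop := out = zapisi_pot_alt pot
instance (pot : List (Int × Int)) (out : String) : Decidable (Spec_zapisi_pot pot out) := by unfold Spec_zapisi_pot; infer_instance

-- ===== CLAIM (what is proved, stated in full; the proofs are below) =====
def Claim_equal_zapisi_pot : Prop := ∀ (pot : List (Int × Int)), Dom_zapisi_pot pot → Spec_zapisi_pot pot (zapisi_pot pot)

-- ===== LEMMAS AND PROOFS =====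
lemma pv_rot_eq (smer target : Int) (h0 : 0 ≤ smer) (h1 : smer ≤ 3)
    (ht0 : 0 ≤ target) (ht1 : target ≤ 3) (koda : List Char) :
    pvRotWhile 4 target smer koda = (target, koda ++ pvLook smer target) := by
  interval_cases smer <;> interval_cases target <;>
    simp [pvRotWhile, pvLook, pvTurnTable, pvDESNO, PySem.List.pyGet?, PySem.List.pyIdx?,
      List.append_assoc]

set_option maxHeartbeats 4000000 in
lemma pv_step_sim (smer : Int) (h0 : 0 ≤ smer) (h1 : smer ≤ 3)
    (koda : List Char) (p q : Int × Int) (rest : List (Int × Int)) :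
    (pvStepA (smer, koda) (p, q)).2 ++ pvGo q rest (pvStepA (smer, koda) (p, q)).1
        = koda ++ pvGo p (q :: rest) smer
      ∧ 0 ≤ (pvStepA (smer, koda) (p, q)).1 ∧ (pvStepA (smer, koda) (p, q)).1 ≤ 3 := by
  have h4 : ∀ (t : Int), 0 ≤ t → t ≤ 3 → ∀ (s : Int) (koda : List Char), 0 ≤ s → s ≤ 3 →
      pvRotWhile 4 t s koda = (t, koda ++ pvLook s t) :=
    fun t ht0 ht1 s koda hs0 hs1 => pv_rot_eq s t hs0 hs1 ht0 ht1 koda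
  simp only [pvStepA, pvGo]
  split_ifs <;>
    first
      | (exfalso; omega)
      | simp_all [List.append_assoc]

lemma pv_loop_sim (rest : List (Int × Int)) : ∀ (p : Int × Int) (smer : Int),
    0 ≤ smer → smer ≤ 3 → ∀ (koda : List Char),
    ((List.zip (p :: rest) rest).foldl pvStepA (smer, koda)).2 = koda ++ pvGo p rest smer := by
  induction rest with
  | nil => intro p smer _ _ koda; simp [pvGo]
  | cons q rest ih =>
    intro p smer h0 h1 koda
    obtain ⟨hstep, hb0, hb1⟩ := pv_step_sim smer h0 h1 koda p q rest
    simp only [List.zip_cons_cons, List.foldl_cons]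
    rw [show pvStepA (smer, koda) (p, q)
        = ((pvStepA (smer, koda) (p, q)).1, (pvStepA (smer, koda) (p, q)).2) from rfl,
      ih q _ hb0 hb1, hstep]

-- ===== VERDICT (by name: the statement is the Claim_ definition above) =====
theorem zapisi_pot_spec : Claim_equal_zapisi_pot := by
  intro pot _
  unfold Spec_zapisi_pot zapisi_pot zapisi_pot_alt
  match pot with
  | [] => rfl
  | p :: rest =>
    simp only [List.drop_one, List.tail_cons]
    rw [pv_loop_sim rest p 0 (by norm_num) (by norm_num) []]
    rfl
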